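-- pv_equiv track=rewrite | github.com/kulleliogluoguz-spec/SEO-AGENT | apps/api/app/agents/geo/geo_auditor.py | _is_crawler_blocked
-- ===== SOURCE A (Python) =====
-- def _is_crawler_blocked(robots_txt: str, crawler_name: str) -> bool:
--     """Check if a specific crawler is blocked in robots.txt."""
--     lines = robots_txt.lower().split("\n")
--     current_agents = []
--     in_relevant_block = False
--
--     for line in lines:
--         line = line.strip()
--         if line.startswith("user-agent:"):
--             agent = line.replace("user-agent:", "").strip()
--             current_agents = [agent]
--             in_relevant_block = (
--                 agent == "*" or crawler_name.lower() in agent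
--             )
--         elif line.startswith("disallow:") and in_relevant_block:
--             disallow_path = line.replace("disallow:", "").strip()
--             if disallow_path == "/" or disallow_path == "/*":
--                 return True
--
--     return False
-- ===== SOURCE B (Python) =====
-- def _is_crawler_blocked(robots_txt: str, crawler_name: str) -> bool:
--     """Check if a specific crawler is blocked in robots.txt."""
--     # Phase 1: parse into (agent, disallow-paths) groups.
--     groups = []
--     cur = None
--     for raw in robots_txt.lower().split("\n"):
--         line = raw.strip()
--         if line.startswith("user-agent:"):
--             if cur is not None:
--                 groups.append(cur)
--             cur = (line.replace("user-agent:", "").strip(), [])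
--         elif line.startswith("disallow:") and cur is not None:
--             cur[1].append(line.replace("disallow:", "").strip())
--     if cur is not None:
--         groups.append(cur)
--     # Phase 2: query the structure.
--     cl = crawler_name.lower()
--     return any(
--         (agent == "*" or cl in agent) and any(p in ("/", "/*") for p in paths)
--         for agent, paths in groups
--     )
-- ===== Notes on version B (the rewrite author's own statement) =====
-- stated objective: alternative
-- what changed: Replaces A's single stateful scan with an early return by a two-phase shape: parse the lines into (agent, disallow-paths) groups, then query the built structure with any().
import Mathlib
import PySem

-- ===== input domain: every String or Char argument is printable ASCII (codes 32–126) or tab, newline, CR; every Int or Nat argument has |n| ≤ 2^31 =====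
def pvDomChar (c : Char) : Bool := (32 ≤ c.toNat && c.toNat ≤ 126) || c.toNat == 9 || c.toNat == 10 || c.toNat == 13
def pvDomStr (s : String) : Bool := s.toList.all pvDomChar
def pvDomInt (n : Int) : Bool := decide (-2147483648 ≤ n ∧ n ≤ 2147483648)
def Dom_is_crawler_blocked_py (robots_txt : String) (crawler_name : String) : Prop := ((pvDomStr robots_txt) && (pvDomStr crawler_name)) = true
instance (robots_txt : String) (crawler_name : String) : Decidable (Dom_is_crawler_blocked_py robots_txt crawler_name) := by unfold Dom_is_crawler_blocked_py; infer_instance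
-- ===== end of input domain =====

-- B replaces A's inline stateful scan by a parse-into-groups phase followed by a query over
-- the built structure (objective: alternative decomposition, same cost).

-- ===== PORT A =====
-- literal transliteration of A's loop: state = (current_agents, in_relevant_block); early return = true
def pvALoop (cl : String) : List String → List String → Bool → Bool
  | [], _, _ => false
  | l :: ls, agents, flag =>
    let line := PySem.Str.strip l
    if PySem.Str.startswith line "user-agent:" then
      let agent := PySem.Str.strip (PySem.Str.replace line "user-agent:" "")
      pvALoop cl ls [agent] (agent == "*" || PySem.Str.isIn cl agent)
    else if PySem.Str.startswith line "disallow:" && flag then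
      let p := PySem.Str.strip (PySem.Str.replace line "disallow:" "")
      if p == "/" || p == "/*" then true else pvALoop cl ls agents flag
    else pvALoop cl ls agents flag

def is_crawler_blocked_py (robots_txt : String) (crawler_name : String) : Bool :=
  -- robots_txt.lower().split("\n"): split with separator "\n", exact via PySem.Chars.splitOn
  let lines := (PySem.Chars.splitOn (PySem.Str.lower robots_txt).toList ['\n']).map String.ofList
  pvALoop (PySem.Str.lower crawler_name) lines [] false

-- ===== PORT B =====
-- Phase 1 step of Source B's loop: fold state = (finished groups, optional open group)
def pvBStep (st : List (String × List String) × Option (String × List String)) (raw : String) :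
    List (String × List String) × Option (String × List String) :=
  let line := PySem.Str.strip raw
  if PySem.Str.startswith line "user-agent:" then
    (st.1 ++ st.2.toList, some (PySem.Str.strip (PySem.Str.replace line "user-agent:" ""), []))
  else if PySem.Str.startswith line "disallow:" then
    match st.2 with
    | some (a, ps) => (st.1, some (a, ps ++ [PySem.Str.strip (PySem.Str.replace line "disallow:" "")]))
    | none => (st.1, none)
  else st

def is_crawler_blocked_py_alt (robots_txt : String) (crawler_name : String) : Bool :=
  let lines := (PySem.Chars.splitOn (PySem.Str.lower robots_txt).toList ['\n']).map String.ofList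
  let st := lines.foldl pvBStep ([], none)
  let groups := st.1 ++ st.2.toList
  let cl := PySem.Str.lower crawler_name
  groups.any (fun g => (g.1 == "*" || PySem.Str.isIn cl g.1) && g.2.any (fun p => p == "/" || p == "/*"))

-- ===== PRECONDITION & SPEC =====
def Spec_is_crawler_blocked_py (robots_txt : String) (crawler_name : String) (out : Bool) : Prop := out = is_crawler_blocked_py_alt robots_txt crawler_name
instance (robots_txt : String) (crawler_name : String) (out : Bool) : Decidable (Spec_is_crawler_blocked_py robots_txt crawler_name out) := by unfold Spec_is_crawler_blocked_py; infer_instance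

-- ===== CLAIM (what is proved, stated in full; the proofs are below) =====
def Claim_equal_is_crawler_blocked_py : Prop := ∀ (robots_txt : String) (crawler_name : String), Dom_is_crawler_blocked_py robots_txt crawler_name → Spec_is_crawler_blocked_py robots_txt crawler_name (is_crawler_blocked_py robots_txt crawler_name)

-- ===== LEMMAS AND PROOFS =====
-- "some group matches the crawler and blocks /"
def pvBlockq (cl : String) (gs : List (String × List String)) : Bool :=
  gs.any (fun g => (g.1 == "*" || PySem.Str.isIn cl g.1) && g.2.any (fun p => p == "/" || p == "/*"))

-- A's flag corresponds to the open group of B's fold state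
def pvCurFlag (cl : String) : Option (String × List String) → Bool
  | none => false
  | some (a, _) => a == "*" || PySem.Str.isIn cl a

-- step lemmas for the ports, one per branch
lemma pvALoop_cons_ua (cl l : String) (ls agents : List String) (flag : Bool)
    (h : PySem.Str.startswith (PySem.Str.strip l) "user-agent:" = true) :
    pvALoop cl (l :: ls) agents flag =
      pvALoop cl ls [PySem.Str.strip (PySem.Str.replace (PySem.Str.strip l) "user-agent:" "")]
        (PySem.Str.strip (PySem.Str.replace (PySem.Str.strip l) "user-agent:" "") == "*" ||
          PySem.Str.isIn cl (PySem.Str.strip (PySem.Str.replace (PySem.Str.strip l) "user-agent:" ""))) := by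
  conv_lhs => rw [pvALoop]
  rw [if_pos h]

lemma pvALoop_cons_dis (cl l : String) (ls agents : List String) (flag : Bool)
    (h1 : PySem.Str.startswith (PySem.Str.strip l) "user-agent:" = false)
    (h2 : (PySem.Str.startswith (PySem.Str.strip l) "disallow:" && flag) = true) :
    pvALoop cl (l :: ls) agents flag =
      (if (PySem.Str.strip (PySem.Str.replace (PySem.Str.strip l) "disallow:" "") == "/" ||
           PySem.Str.strip (PySem.Str.replace (PySem.Str.strip l) "disallow:" "") == "/*") = true
       then true else pvALoop cl ls agents flag) := by
  conv_lhs => rw [pvALoop]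
  rw [if_neg (ne_true_of_eq_false h1), if_pos h2]

lemma pvALoop_cons_skip (cl l : String) (ls agents : List String) (flag : Bool)
    (h1 : PySem.Str.startswith (PySem.Str.strip l) "user-agent:" = false)
    (h2 : (PySem.Str.startswith (PySem.Str.strip l) "disallow:" && flag) = false) :
    pvALoop cl (l :: ls) agents flag = pvALoop cl ls agents flag := by
  conv_lhs => rw [pvALoop]
  rw [if_neg (ne_true_of_eq_false h1), if_neg (ne_true_of_eq_false h2)]

lemma pvBStep_ua (gs : List (String × List String)) (cur : Option (String × List String)) (l : String)
    (h : PySem.Str.startswith (PySem.Str.strip l) "user-agent:" = true) :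
    pvBStep (gs, cur) l =
      (gs ++ cur.toList, some (PySem.Str.strip (PySem.Str.replace (PySem.Str.strip l) "user-agent:" ""), [])) := by
  unfold pvBStep
  rw [if_pos h]

lemma pvBStep_dis_some (gs : List (String × List String)) (a : String) (ps : List String) (l : String)
    (h1 : PySem.Str.startswith (PySem.Str.strip l) "user-agent:" = false)
    (h2 : PySem.Str.startswith (PySem.Str.strip l) "disallow:" = true) :
    pvBStep (gs, some (a, ps)) l =
      (gs, some (a, ps ++ [PySem.Str.strip (PySem.Str.replace (PySem.Str.strip l) "disallow:" "")])) := by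
  unfold pvBStep
  rw [if_neg (ne_true_of_eq_false h1), if_pos h2]

lemma pvBStep_dis_none (gs : List (String × List String)) (l : String)
    (h1 : PySem.Str.startswith (PySem.Str.strip l) "user-agent:" = false)
    (h2 : PySem.Str.startswith (PySem.Str.strip l) "disallow:" = true) :
    pvBStep (gs, none) l = (gs, none) := by
  unfold pvBStep
  rw [if_neg (ne_true_of_eq_false h1), if_pos h2]

lemma pvBStep_skip (gs : List (String × List String)) (cur : Option (String × List String)) (l : String)
    (h1 : PySem.Str.startswith (PySem.Str.strip l) "user-agent:" = false)
    (h2 : PySem.Str.startswith (PySem.Str.strip l) "disallow:" = false) :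
    pvBStep (gs, cur) l = (gs, cur) := by
  unfold pvBStep
  rw [if_neg (ne_true_of_eq_false h1), if_neg (ne_true_of_eq_false h2)]

-- pvBlockq over an appended singleton group
lemma pvBlockq_append_one (cl : String) (gs : List (String × List String)) (a : String) (ps : List String) :
    pvBlockq cl (gs ++ [(a, ps)]) =
      (pvBlockq cl gs || ((a == "*" || PySem.Str.isIn cl a) && ps.any (fun p => p == "/" || p == "/*"))) := by
  simp only [pvBlockq, List.any_append, List.any_cons, List.any_nil, Bool.or_false]

-- once a matching-and-blocking group exists in the state, the final query stays true
lemma pvMono (cl : String) : ∀ (ls : List String) (gs : List (String × List String))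
    (cur : Option (String × List String)),
    pvBlockq cl (gs ++ cur.toList) = true →
    pvBlockq cl ((ls.foldl pvBStep (gs, cur)).1 ++ (ls.foldl pvBStep (gs, cur)).2.toList) = true := by
  intro ls
  induction ls with
  | nil => intro gs cur h; simpa using h
  | cons l ls ih =>
    intro gs cur h
    simp only [List.foldl_cons]
    cases h1 : PySem.Str.startswith (PySem.Str.strip l) "user-agent:" with
    | true =>
      rw [pvBStep_ua _ _ _ h1]
      refine ih _ _ ?_
      show pvBlockq cl ((gs ++ cur.toList) ++
        [(PySem.Str.strip (PySem.Str.replace (PySem.Str.strip l) "user-agent:" ""), [])]) = true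
      rw [pvBlockq_append_one, h, Bool.true_or]
    | false =>
      cases h2 : PySem.Str.startswith (PySem.Str.strip l) "disallow:" with
      | true =>
        cases cur with
        | none => rw [pvBStep_dis_none _ _ h1 h2]; exact ih _ _ h
        | some g =>
          obtain ⟨a, ps⟩ := g
          rw [pvBStep_dis_some _ _ _ _ h1 h2]
          refine ih _ _ ?_
          simp only [Option.toList_some] at h ⊢
          rw [pvBlockq_append_one] at h ⊢
          simp only [List.any_append, List.any_cons, List.any_nil, Bool.or_false]
          rcases Bool.or_eq_true_iff.mp h with h' | h'
          · rw [h', Bool.true_or]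
          · have hh := Bool.and_eq_true_iff.mp h'
            rw [hh.1, hh.2]
            simp
      | false => rw [pvBStep_skip _ _ _ h1 h2]; exact ih _ _ h
lemma pvMain (cl : String) : ∀ (ls : List String) (agents : List String)
    (gs : List (String × List String)) (cur : Option (String × List String)),
    pvBlockq cl (gs ++ cur.toList) = false →
    pvALoop cl ls agents (pvCurFlag cl cur) =
      pvBlockq cl ((ls.foldl pvBStep (gs, cur)).1 ++ (ls.foldl pvBStep (gs, cur)).2.toList) := by
  intro ls
  induction ls with
  | nil =>
    intro agents gs cur hinv
    simp only [pvALoop, List.foldl_nil]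
    exact hinv.symm
  | cons l ls ih =>
    intro agents gs cur hinv
    simp only [List.foldl_cons]
    cases h1 : PySem.Str.startswith (PySem.Str.strip l) "user-agent:" with
    | true =>
      -- user-agent line: flag is recomputed; B closes the open group and opens a fresh one
      rw [pvALoop_cons_ua _ _ _ _ _ h1, pvBStep_ua _ _ _ h1]
      have hinv' : pvBlockq cl ((gs ++ cur.toList) ++
          (some (PySem.Str.strip (PySem.Str.replace (PySem.Str.strip l) "user-agent:" ""), []) :
            Option (String × List String)).toList) = false := by
        simp only [Option.toList_some]
        rw [pvBlockq_append_one, hinv]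
        simp
      have := ih [PySem.Str.strip (PySem.Str.replace (PySem.Str.strip l) "user-agent:" "")]
        (gs ++ cur.toList) (some (PySem.Str.strip (PySem.Str.replace (PySem.Str.strip l) "user-agent:" ""), [])) hinv'
      simpa [pvCurFlag] using this
    | false =>
      cases h2 : PySem.Str.startswith (PySem.Str.strip l) "disallow:" with
      | false =>
        -- irrelevant line: both sides keep their state
        rw [pvALoop_cons_skip _ _ _ _ _ h1 (by rw [h2, Bool.false_and]),
          pvBStep_skip _ _ _ h1 h2]
        exact ih agents gs cur hinv
      | true =>
        cases cur with
        | none =>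
          -- no open group: A's flag is false, B leaves the state unchanged
          rw [pvALoop_cons_skip _ _ _ _ _ h1 (by simp [pvCurFlag]),
            pvBStep_dis_none _ _ h1 h2]
          exact ih agents gs none hinv
        | some g =>
          obtain ⟨a, ps⟩ := g
          rw [pvBStep_dis_some _ _ _ _ h1 h2]
          set p := PySem.Str.strip (PySem.Str.replace (PySem.Str.strip l) "disallow:" "") with hp
          cases hm : (a == "*" || PySem.Str.isIn cl a) with
          | true =>
            -- matching open group: A's flag is true
            rw [pvALoop_cons_dis _ _ _ _ _ h1 (by simp only [pvCurFlag]; rw [h2, hm]; rfl)]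
            cases hb : (p == "/" || p == "/*") with
            | true =>
              -- blocking path: A returns true; B's final query is true by monotonicity
              rw [if_pos rfl]
              have hblk : pvBlockq cl (gs ++ (some (a, ps ++ [p]) :
                  Option (String × List String)).toList) = true := by
                simp only [Option.toList_some]
                rw [pvBlockq_append_one, hm]
                simp only [List.any_append, List.any_cons, List.any_nil, Bool.or_false, hb]
                simp
              exact (pvMono cl ls gs (some (a, ps ++ [p])) hblk).symm
            | false =>
              -- non-blocking path appended: the invariant is preserved
              rw [if_neg Bool.false_ne_true]
              have hinv' : pvBlockq cl (gs ++ (some (a, ps ++ [p]) :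
                  Option (String × List String)).toList) = false := by
                simp only [Option.toList_some] at hinv ⊢
                rw [pvBlockq_append_one] at hinv ⊢
                simp only [List.any_append, List.any_cons, List.any_nil, Bool.or_false, hb]
                simpa using hinv
              have := ih agents gs (some (a, ps ++ [p])) hinv'
              simpa [pvCurFlag, hm] using this
          | false =>
            -- non-matching open group: A's flag is false; B appends a path that can never count
            rw [pvALoop_cons_skip _ _ _ _ _ h1 (by simp only [pvCurFlag]; rw [hm, Bool.and_false])]
            have hinv' : pvBlockq cl (gs ++ (some (a, ps ++ [p]) :
                Option (String × List String)).toList) = false := by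
              simp only [Option.toList_some] at hinv ⊢
              rw [pvBlockq_append_one, hm] at hinv ⊢
              simpa using hinv
            have := ih agents gs (some (a, ps ++ [p])) hinv'
            simpa [pvCurFlag, hm] using this

-- ===== VERDICT (by name: the statement is the Claim_ definition above) =====
theorem is_crawler_blocked_py_spec : Claim_equal_is_crawler_blocked_py := by
  intro robots_txt crawler_name _
  unfold Spec_is_crawler_blocked_py is_crawler_blocked_py is_crawler_blocked_py_alt
  have := pvMain (PySem.Str.lower crawler_name)
    ((PySem.Chars.splitOn (PySem.Str.lower robots_txt).toList ['\n']).map String.ofList)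
    [] [] none (by simp [pvBlockq])
  simpa [pvCurFlag, pvBlockq] using this
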